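-- pv_equiv track=rewrite | github.com/chungocchien/algorithm | mod_luy_thua.py | find
-- ===== SOURCE A (Python) =====
-- import math
--
-- def find_mode(a, b, m):
--     n = bin(b).replace('0b', '')[::-1]
--     x = 1
--     power = a % m
--     for i in n:
--         if i == '1':
--             x1 = x * power
--             x = x1 % m
--         p = power * power
--         power = p % m
--     return x
--
-- def isPrime(n):
--     count = 0
--     if n == 0 or n == 1:
--         return False
--     for i in range(2, int(math.sqrt(n)) + 1):
--         if n % i == 0:
--             count += 1
--             break
--     if count == 0:
--         return True
--     return False
--
-- def find(n):
--     m = 0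
--     a = []
--     count = 0
--     for i in range(1, int(n/2)):
--         if (n - 1) % i == 0 and isPrime(i):
--             a.append(i)
--     for i in range(2, n):
--         for j in a:
--             if find_mode(i, int((n - 1) / j), n) == 1:
--                 count = 0
--                 break
--             if find_mode(i, int((n - 1) / j), n) != 1:
--                 count += 1
--         if count == len(a):
--             m = i
--             break
--     return m
-- ===== SOURCE B (Python) =====
-- def find(n):
--     # Re-implementation: factor n-1 once by trial division (O(sqrt n)) instead of
--     # scanning every i < n/2 with a primality test; use builtin pow for the modpow.
--     if n < 3:
--         return 0
--     m = n - 1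
--     primes = []
--     d = 2
--     while d * d <= m:
--         if m % d == 0:
--             primes.append(d)
--             while m % d == 0:
--                 m //= d
--         d += 1
--     if m > 1:
--         primes.append(m)
--     half = n // 2
--     exps = [(n - 1) // p for p in primes if p < half]
--     for g in range(2, n):
--         if all(pow(g, e, n) != 1 for e in exps):
--             return g
--     return 0
-- ===== Notes on version B (the rewrite author's own statement) =====
-- stated objective: faster
-- what changed: B factors n-1 once by trial division up to sqrt(n-1) (keeping the prime factors below n//2, the same set A tests) instead of A's scan of every i < n/2 with a trial-division primality test, and replaces A's hand-rolled binary modpow (computed twice per factor) with one builtin pow(g, e, n) per factor.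
import Mathlib
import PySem

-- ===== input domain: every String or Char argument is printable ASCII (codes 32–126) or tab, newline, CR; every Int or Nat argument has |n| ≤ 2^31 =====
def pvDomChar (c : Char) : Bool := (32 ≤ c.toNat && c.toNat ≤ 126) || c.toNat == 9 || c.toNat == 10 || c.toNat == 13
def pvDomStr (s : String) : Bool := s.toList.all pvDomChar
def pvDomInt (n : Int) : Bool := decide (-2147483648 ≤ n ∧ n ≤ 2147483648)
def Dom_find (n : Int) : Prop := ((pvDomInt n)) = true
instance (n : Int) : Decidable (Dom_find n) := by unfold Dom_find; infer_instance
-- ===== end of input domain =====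

-- B factors n-1 once by trial division instead of scanning every i < n/2 with a
-- primality test, and uses a single builtin-style modpow per test (objective: faster).


-- ===== PORT A =====

-- bin(b).replace('0b','')[::-1]: the binary digits of |b|, least significant first.
def bitsAux (b : Nat) : List Bool :=
  if h : b = 0 then [] else (b % 2 == 1) :: bitsAux (b / 2)
decreasing_by exact Nat.div_lt_self (Nat.pos_of_ne_zero h) one_lt_two

-- bin(0) = "0": one '0' digit.  For b < 0 the reversed string ends with the extra
-- char '-', which (being neither '0' nor '1') only squares `power` once more and
-- leaves the returned x unchanged, so the digit list of |b| yields the same result.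
def pyBits (b : Int) : List Bool := if b = 0 then [false] else bitsAux b.natAbs

def fmLoop (m : Int) (x power : Int) : List Bool → Int
  | [] => x
  | i :: rest =>
      let x' := if i then PySem.Int.mod (x * power) m else x
      fmLoop m x' (PySem.Int.mod (power * power) m) rest

def find_mode (a b m : Int) : Int := fmLoop m 1 (PySem.Int.mod a m) (pyBits b)

def primeLoop (n : Int) (count : Int) : List Int → Int
  | [] => count
  | i :: rest =>
      if PySem.Int.mod n i = 0 then count + 1 else primeLoop n count rest

def isPrime (n : Int) : Bool :=
  if n = 0 || n = 1 then false
  else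
    -- int(math.sqrt(n)) = Nat.sqrt for the arguments find passes (0 ≤ n ≤ 2^31)
    let count := primeLoop n 0 (PySem.List.pyRange 2 ((Nat.sqrt n.toNat : Int) + 1) 1)
    if count = 0 then true else false

def innerLoop (nn i : Int) (count : Int) : List Int → Int
  | [] => count
  | j :: rest =>
      -- int((n-1)/j): float division is exact here (j divides n-1, |n| ≤ 2^31); truncates
      if find_mode i ((nn - 1).tdiv j) nn = 1 then 0
      else if find_mode i ((nn - 1).tdiv j) nn ≠ 1 then innerLoop nn i (count + 1) rest
      else innerLoop nn i count rest

def outerLoop (nn : Int) (a : List Int) (count : Int) : List Int → Int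
  | [] => 0
  | i :: rest =>
      let c := innerLoop nn i count a
      if c = (a.length : Int) then i else outerLoop nn a c rest

def find (n : Int) : Int :=
  -- int(n/2): float division exact for |n| ≤ 2^31; truncates toward zero
  let a := (PySem.List.pyRange 1 (n.tdiv 2) 1).filter
      (fun i => (PySem.Int.mod (n - 1) i == 0) && isPrime i)
  outerLoop n a 0 (PySem.List.pyRange 2 n 1)

-- ===== PORT B =====

-- inner `while m % d == 0: m //= d` (the ≥-guards only make the recursion total;
-- every call B makes has 2 ≤ d and 1 ≤ m)
def stripFac (d m : Nat) : Nat :=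
  if h : 2 ≤ d ∧ 1 ≤ m ∧ m % d = 0 then stripFac d (m / d) else m
termination_by m
decreasing_by exact Nat.div_lt_self h.2.1 (by omega)

theorem stripFac_le (d m : Nat) : stripFac d m ≤ m := by
  refine stripFac.induct d (fun m => stripFac d m ≤ m) ?_ ?_ m
  · intro m h ih; rw [stripFac, dif_pos h]; exact le_trans ih (Nat.div_le_self _ _)
  · intro m h; rw [stripFac, dif_neg h]

-- outer `while d * d <= m` trial-division loop, returning (final m, primes list)
def tdLoop (d m : Nat) (ps : List Nat) : Nat × List Nat :=
  if h : 2 ≤ d ∧ d * d ≤ m then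
    if hd : m % d = 0 then tdLoop (d + 1) (stripFac d m) (ps ++ [d])
    else tdLoop (d + 1) m ps
  else (m, ps)
termination_by (m, m - d)
decreasing_by
  · apply Prod.Lex.left
    calc stripFac d m = stripFac d (m / d) := by
          rw [stripFac]; simp only [dif_pos (show 2 ≤ d ∧ 1 ≤ m ∧ m % d = 0 by
            refine ⟨h.1, by nlinarith [h.2], hd⟩)]
      _ ≤ m / d := stripFac_le d (m / d)
      _ < m := Nat.div_lt_self (by nlinarith [h.2]) (by omega)
  · apply Prod.Lex.right
    have : 2 * d ≤ d * d := Nat.mul_le_mul_right d h.1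
    omega

def firstG (n : Int) (exps : List Int) : List Int → Int
  | [] => 0
  | g :: rest =>
      if exps.all (fun e => PySem.Int.powMod g e.toNat n != 1) then g
      else firstG n exps rest

def find_alt (n : Int) : Int :=
  if n < 3 then 0
  else
    let r := tdLoop 2 (n - 1).toNat []
    let primes := if 1 < r.1 then r.2 ++ [r.1] else r.2
    let half := PySem.Int.floordiv n 2
    let exps := (primes.filter (fun p : Nat => (p : Int) < half)).map
        (fun p : Nat => PySem.Int.floordiv (n - 1) (p : Int))
    -- pow(g, e, n) with e = (n-1)//p ≥ 1 → PySem.Int.powMod with a Nat exponent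
    firstG n exps (PySem.List.pyRange 2 n 1)

-- ===== PRECONDITION & SPEC =====
def Spec_find (n : Int) (out : Int) : Prop := out = find_alt n
instance (n : Int) (out : Int) : Decidable (Spec_find n out) := by unfold Spec_find; infer_instance

-- ===== CLAIM (what is proved, stated in full; the proofs are below) =====
def Claim_equal_find : Prop := ∀ (n : Int), Dom_find n → Spec_find n (find n)

-- ===== LEMMAS AND PROOFS =====

-- value of an LSB-first digit list
def bitsVal (l : List Bool) : Nat := l.foldr (fun b acc => (if b then 1 else 0) + 2 * acc) 0

theorem bitsAux_val (b : Nat) : bitsVal (bitsAux b) = b := by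
  induction b using Nat.strong_induction_on with
  | _ b ih =>
    rw [bitsAux]
    split
    · next h => subst h; simp [bitsVal]
    · next h =>
      have h2 := ih (b / 2) (Nat.div_lt_self (Nat.pos_of_ne_zero h) one_lt_two)
      simp only [bitsVal, List.foldr] at h2 ⊢
      rw [h2]
      rcases Nat.mod_two_eq_zero_or_one b with h1 | h1 <;> simp [h1] <;> omega

theorem pyBits_val (b : Int) (hb : 0 ≤ b) : bitsVal (pyBits b) = b.toNat := by
  unfold pyBits
  split
  · next h => subst h; simp [bitsVal]
  · next h => rw [bitsAux_val]; omega

theorem fmLoop_eq (m : Int) (hm : 1 < m) :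
    ∀ (bs : List Bool) (X P : Int),
      fmLoop m (X % m) (P % m) bs = (X * P ^ bitsVal bs) % m := by
  intro bs
  induction bs with
  | nil => intro X P; simp [fmLoop, bitsVal]
  | cons b rest ih =>
    intro X P
    have hmod : ∀ x : Int, PySem.Int.mod x m = x % m :=
      fun x => PySem.Int.mod_eq_emod_of_pos (by omega)
    have hval : bitsVal (b :: rest) = (if b then 1 else 0) + 2 * bitsVal rest := by
      simp [bitsVal]
    cases b with
    | true =>
      have e1 : X % m * (P % m) % m = X * P % m := (Int.mul_emod X P m).symm
      have e2 : P % m * (P % m) % m = P * P % m := (Int.mul_emod P P m).symm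
      simp only [fmLoop, hmod, e1, e2, reduceIte]
      rw [ih (X * P) (P * P), hval]
      congr 1
      rw [if_pos rfl, pow_add, pow_mul, pow_one, pow_two]; ring
    | false =>
      have e2 : P % m * (P % m) % m = P * P % m := (Int.mul_emod P P m).symm
      simp only [fmLoop, hmod, e2, Bool.false_eq_true, if_false]
      rw [ih X (P * P), hval]
      congr 1
      rw [show ((if false = true then 1 else 0) + 2 * bitsVal rest) = 2 * bitsVal rest by simp, pow_mul, pow_two]

theorem find_mode_eq (a b m : Int) (hm : 1 < m) (hb : 0 ≤ b) :
    find_mode a b m = (a ^ b.toNat) % m := by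
  unfold find_mode
  rw [PySem.Int.mod_eq_emod_of_pos (by omega),
    show (1 : Int) = 1 % m from (Int.emod_eq_of_lt (by norm_num) hm).symm,
    fmLoop_eq m hm (pyBits b) 1 a, pyBits_val b hb, one_mul]

theorem primeLoop_spec (n : Int) (L : List Int) (c : Int) :
    primeLoop n c L = if L.any (fun i => PySem.Int.mod n i = 0) then c + 1 else c := by
  induction L with
  | nil => simp [primeLoop]
  | cons j rest ih =>
    simp only [primeLoop, List.any_cons]
    by_cases h : PySem.Int.mod n j = 0 <;> simp [h, ih]

theorem isPrime_iff (i : Int) (h2 : 2 ≤ i) : isPrime i = true ↔ Nat.Prime i.toNat := by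
  have hne : ¬ (i = 0 || i = 1) = true := by simp; omega
  have key : (∀ d ∈ PySem.List.pyRange 2 ((Nat.sqrt i.toNat : Int) + 1) 1,
      ¬ (PySem.Int.mod i d = 0)) ↔
      (∀ q : Nat, 2 ≤ q → q ≤ Nat.sqrt i.toNat → ¬ q ∣ i.toNat) := by
    constructor
    · intro h q hq1 hq2 hdvd
      refine h (q : Int) ?_ ?_
      · rw [PySem.List.mem_pyRange_one]
        refine ⟨by exact_mod_cast hq1, by omega⟩
      · rw [PySem.Int.mod_eq_zero_iff_dvd]
        have : (q : Int) ∣ (i.toNat : Int) := Int.natCast_dvd_natCast.mpr hdvd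
        rwa [Int.toNat_of_nonneg (by omega)] at this
    · intro h d hd hmod
      rw [PySem.List.mem_pyRange_one] at hd
      rw [PySem.Int.mod_eq_zero_iff_dvd] at hmod
      refine h d.toNat (by omega) (by omega) ?_
      have : (d.toNat : Int) ∣ (i.toNat : Int) := by
        rw [Int.toNat_of_nonneg (show (0:Int) ≤ d by omega), Int.toNat_of_nonneg (by omega)]
        exact hmod
      exact_mod_cast this
  unfold isPrime
  rw [if_neg hne, primeLoop_spec, Nat.prime_def_le_sqrt]
  by_cases hany : ((PySem.List.pyRange 2 ((Nat.sqrt i.toNat : Int) + 1) 1).any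
      (fun d => PySem.Int.mod i d = 0) = true)
  · rw [if_pos hany]
    simp only [List.any_eq_true, decide_eq_true_iff] at hany
    obtain ⟨d, hd, hmod⟩ := hany
    constructor
    · intro hcontra; norm_num at hcontra
    · rintro ⟨_, hq⟩
      exact absurd hmod (key.mpr hq d hd)
  · rw [if_neg hany, if_pos rfl]
    simp only [List.any_eq_true, decide_eq_true_iff] at hany
    push Not at hany
    simp only [true_iff]
    exact ⟨by omega, key.mp hany⟩
theorem stripFac_pos (d m : Nat) (hm : 1 ≤ m) : 1 ≤ stripFac d m := by
  refine stripFac.induct d (fun m => 1 ≤ m → 1 ≤ stripFac d m) ?_ ?_ m hm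
  · intro m h ih _
    rw [stripFac, dif_pos h]
    refine ih ?_
    have hdvd : d ∣ m := Nat.dvd_iff_mod_eq_zero.mpr h.2.2
    have := Nat.le_of_dvd (by omega) hdvd
    exact (Nat.one_le_div_iff (by omega)).mpr this
  · intro m h hm
    rw [stripFac, dif_neg h]; exact hm

theorem stripFac_dvd (d m : Nat) : stripFac d m ∣ m := by
  refine stripFac.induct d (fun m => stripFac d m ∣ m) ?_ ?_ m
  · intro m h ih
    rw [stripFac, dif_pos h]
    have hdvd : d ∣ m := Nat.dvd_iff_mod_eq_zero.mpr h.2.2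
    exact ih.trans (Nat.div_dvd_of_dvd hdvd)
  · intro m h
    rw [stripFac, dif_neg h]

theorem stripFac_not_dvd (d m : Nat) (hd : 2 ≤ d) (hm : 1 ≤ m) : ¬ d ∣ stripFac d m := by
  refine stripFac.induct d (fun m => 1 ≤ m → ¬ d ∣ stripFac d m) ?_ ?_ m hm
  · intro m h ih _
    rw [stripFac, dif_pos h]
    refine ih ?_
    have hdvd : d ∣ m := Nat.dvd_iff_mod_eq_zero.mpr h.2.2
    exact (Nat.one_le_div_iff (by omega)).mpr (Nat.le_of_dvd (by omega) hdvd)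
  · intro m h hm1
    rw [stripFac, dif_neg h]
    intro hdvd
    exact h ⟨hd, hm1, Nat.dvd_iff_mod_eq_zero.mp hdvd⟩

theorem dvd_stripFac (d m p : Nat) (pp : p.Prime) (hpd : ¬ p ∣ d) (hpm : p ∣ m) :
    p ∣ stripFac d m := by
  refine stripFac.induct d (fun m => p ∣ m → p ∣ stripFac d m) ?_ ?_ m hpm
  · intro m h ih hpm
    rw [stripFac, dif_pos h]
    refine ih ?_
    have hdvd : d ∣ m := Nat.dvd_iff_mod_eq_zero.mpr h.2.2
    have hm : m = d * (m / d) := (Nat.mul_div_cancel' hdvd).symm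
    rw [hm] at hpm
    exact (pp.dvd_mul.mp hpm).resolve_left hpd
  · intro m h hpm
    rw [stripFac, dif_neg h]; exact hpm

theorem tdLoop_spec (d m : Nat) (ps : List Nat) :
    2 ≤ d → 1 ≤ m → (∀ q, 2 ≤ q → q ∣ m → d ≤ q) →
    1 ≤ (tdLoop d m ps).1 ∧ (tdLoop d m ps).1 ∣ m ∧
      (1 < (tdLoop d m ps).1 → ((tdLoop d m ps).1).Prime) ∧
      (∀ x, x ∈ (tdLoop d m ps).2 ↔
        x ∈ ps ∨ (x.Prime ∧ x ∣ m ∧ ¬ x ∣ (tdLoop d m ps).1)) := by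
  induction d, m, ps using tdLoop.induct with
  | case1 d m ps h hmod ih =>
    intro hd hm hsmall
    have hddvd : d ∣ m := Nat.dvd_iff_mod_eq_zero.mpr hmod
    -- at this point d must be prime: every proper divisor ≥ 2 of m is ≥ d
    have hdp : d.Prime := by
      rw [Nat.prime_def_lt]
      refine ⟨hd, fun q hq hqd => ?_⟩
      by_contra hne
      have hq2 : 2 ≤ q := by
        rcases Nat.eq_zero_or_pos q with h0 | h0
        · subst h0; simp at hqd; omega
        · omega
      exact absurd (hsmall q hq2 (hqd.trans hddvd)) (by omega)
    have hm4 : 4 ≤ m := by nlinarith [h.2]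
    set m' := stripFac d m with hm'
    have hm'pos : 1 ≤ m' := stripFac_pos d m (by omega)
    have hm'dvd : m' ∣ m := stripFac_dvd d m
    have hndvd : ¬ d ∣ m' := stripFac_not_dvd d m hd (by omega)
    have hsmall' : ∀ q, 2 ≤ q → q ∣ m' → d + 1 ≤ q := by
      intro q hq2 hqm'
      have hge := hsmall q hq2 (hqm'.trans hm'dvd)
      rcases Nat.eq_or_lt_of_le hge with heq | hlt
      · exact absurd (heq ▸ hqm') hndvd
      · omega
    obtain ⟨ih1, ih2, ih3, ih4⟩ := ih (by omega) hm'pos hsmall'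
    rw [tdLoop, dif_pos h, dif_pos hmod]
    refine ⟨ih1, ih2.trans hm'dvd, ih3, fun x => ?_⟩
    rw [ih4 x, List.mem_append, List.mem_singleton]
    set r := (tdLoop (d + 1) (stripFac d m) (ps ++ [d])).1 with hr
    constructor
    · rintro ((hx | hx) | ⟨hxp, hxm', hxr⟩)
      · exact Or.inl hx
      · subst hx
        refine Or.inr ⟨hdp, hddvd, fun hdr => hndvd (hdr.trans ih2)⟩
      · exact Or.inr ⟨hxp, hxm'.trans hm'dvd, hxr⟩
    · rintro (hx | ⟨hxp, hxm, hxr⟩)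
      · exact Or.inl (Or.inl hx)
      · by_cases hxd : x = d
        · exact Or.inl (Or.inr hxd)
        · have hxnd : ¬ x ∣ d := fun hdvd =>
            hxd ((Nat.prime_dvd_prime_iff_eq hxp hdp).mp hdvd)
          exact Or.inr ⟨hxp, dvd_stripFac d m x hxp hxnd hxm, hxr⟩
  | case2 d m ps h hmod ih =>
    intro hd hm hsmall
    have hndvd : ¬ d ∣ m := fun hdvd => hmod (Nat.dvd_iff_mod_eq_zero.mp hdvd)
    have hsmall' : ∀ q, 2 ≤ q → q ∣ m → d + 1 ≤ q := by
      intro q hq2 hqm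
      have hge := hsmall q hq2 hqm
      rcases Nat.eq_or_lt_of_le hge with heq | hlt
      · exact absurd (heq ▸ hqm) hndvd
      · omega
    obtain ⟨ih1, ih2, ih3, ih4⟩ := ih (by omega) hm hsmall'
    rw [tdLoop, dif_pos h, dif_neg hmod]
    exact ⟨ih1, ih2, ih3, ih4⟩
  | case3 d m ps h =>
    intro hd hm hsmall
    rw [tdLoop, dif_neg h]
    have hmdd : m < d * d := by
      rcases Nat.lt_or_ge m (d * d) with hlt | hge
      · exact hlt
      · exact absurd ⟨hd, hge⟩ h
    refine ⟨hm, dvd_rfl, fun hm1 => ?_, fun x => ?_⟩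
    · by_contra hnp
      have hminfac2 : 2 ≤ m.minFac := (Nat.minFac_prime (by omega)).two_le
      have hge := hsmall m.minFac hminfac2 (Nat.minFac_dvd m)
      have hsq : m.minFac ^ 2 ≤ m := Nat.minFac_sq_le_self (by omega) hnp
      have : d * d ≤ m.minFac * m.minFac := Nat.mul_le_mul hge hge
      nlinarith
    · simp only
      constructor
      · exact Or.inl
      · rintro (hx | ⟨hxp, hxm, hxr⟩)
        · exact hx
        · exact absurd hxm hxr
-- the complete list of prime factors that B extracts
theorem primesB_mem (m : Nat) (hm : 1 ≤ m) (x : Nat) :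
    (x ∈ (if 1 < (tdLoop 2 m []).1 then (tdLoop 2 m []).2 ++ [(tdLoop 2 m []).1]
          else (tdLoop 2 m []).2)) ↔ x.Prime ∧ x ∣ m := by
  obtain ⟨h1, h2, h3, h4⟩ := tdLoop_spec 2 m [] (le_refl 2) hm (fun q hq _ => hq)
  set r := (tdLoop 2 m []).1 with hr
  by_cases hbig : 1 < r
  · rw [if_pos hbig, List.mem_append, List.mem_singleton, h4 x]
    have hrp := h3 hbig
    constructor
    · rintro ((h | ⟨hxp, hxm, _⟩) | hxr)
      · simp at h
      · exact ⟨hxp, hxm⟩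
      · subst hxr; exact ⟨hrp, h2⟩
    · rintro ⟨hxp, hxm⟩
      by_cases hxr : x ∣ r
      · exact Or.inr ((Nat.prime_dvd_prime_iff_eq hxp hrp).mp hxr)
      · exact Or.inl (Or.inr ⟨hxp, hxm, hxr⟩)
  · rw [if_neg hbig, h4 x]
    have hr1 : r = 1 := by omega
    constructor
    · rintro (h | ⟨hxp, hxm, _⟩)
      · simp at h
      · exact ⟨hxp, hxm⟩
    · rintro ⟨hxp, hxm⟩
      refine Or.inr ⟨hxp, hxm, fun hxr => ?_⟩
      rw [hr1] at hxr
      exact hxp.one_lt.ne' (Nat.eq_one_of_dvd_one hxr)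

theorem innerLoop_all (nn i : Int) (L : List Int)
    (h : ∀ j ∈ L, find_mode i ((nn - 1).tdiv j) nn ≠ 1) (c : Int) :
    innerLoop nn i c L = c + L.length := by
  induction L generalizing c with
  | nil => simp [innerLoop]
  | cons j rest ih =>
    have hj := h j (List.mem_cons_self ..)
    simp only [innerLoop, if_neg hj, if_pos hj]
    rw [ih (fun x hx => h x (List.mem_cons_of_mem _ hx)) (c + 1)]
    simp
    ring

theorem innerLoop_break (nn i : Int) (L : List Int)
    (h : ¬ ∀ j ∈ L, find_mode i ((nn - 1).tdiv j) nn ≠ 1) (c : Int) :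
    innerLoop nn i c L = 0 := by
  induction L generalizing c with
  | nil => exact absurd (by simp) h
  | cons j rest ih =>
    by_cases hj : find_mode i ((nn - 1).tdiv j) nn = 1
    · simp [innerLoop, hj]
    · simp only [innerLoop, if_neg hj, if_pos hj]
      refine ih (fun hall => h ?_) (c + 1)
      intro x hx
      rcases List.mem_cons.mp hx with rfl | hx
      · exact hj
      · exact hall x hx

theorem loops_eq (nn : Int) (a : List Int) (exps : List Int)
    (hcond : ∀ i ∈ PySem.List.pyRange 2 nn 1,
      ((∀ j ∈ a, find_mode i ((nn - 1).tdiv j) nn ≠ 1) ↔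
        (exps.all (fun e => PySem.Int.powMod i e.toNat nn != 1) = true))) :
    ∀ L, (∀ i ∈ L, i ∈ PySem.List.pyRange 2 nn 1) →
      outerLoop nn a 0 L = firstG nn exps L := by
  intro L
  induction L with
  | nil => intro _; rfl
  | cons i rest ih =>
    intro hmem
    have hiff := hcond i (hmem i (List.mem_cons_self ..))
    by_cases hA : ∀ j ∈ a, find_mode i ((nn - 1).tdiv j) nn ≠ 1
    · simp only [outerLoop, innerLoop_all nn i a hA 0, zero_add, firstG,
        if_pos (hiff.mp hA)]
      simp
    · have hne : a ≠ [] := by rintro rfl; exact hA (by simp)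
      have hlen : (0 : Int) ≠ (a.length : Int) := by
        have := List.length_pos_iff.mpr hne
        omega
      simp only [outerLoop, innerLoop_break nn i a hA 0, if_neg hlen, firstG,
        if_neg (fun hB => hA (hiff.mpr hB))]
      exact ih (fun x hx => hmem x (List.mem_cons_of_mem _ hx))

-- per-tested-element: A's hand-rolled binary modpow equals B's builtin modpow
theorem helt (n : Int) (h3 : 3 ≤ n) (i : Int) (x : Nat) (hxp : Nat.Prime x)
    (hxd : (x : Int) ∣ (n - 1)) :
    (find_mode i ((n - 1).tdiv (x : Int)) n ≠ 1 ↔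
      (PySem.Int.powMod i (PySem.Int.floordiv (n - 1) (x : Int)).toNat n != 1) = true) := by
  have hx2 : (2 : Int) ≤ (x : Int) := by exact_mod_cast hxp.two_le
  have he : (n - 1).tdiv (x : Int) = PySem.Int.floordiv (n - 1) (x : Int) := by
    rw [PySem.Int.floordiv_eq_ediv_of_pos (by omega), Int.tdiv_eq_ediv_of_nonneg (by omega)]
  have he0 : 0 ≤ (n - 1).tdiv (x : Int) := Int.tdiv_nonneg (by omega) (by omega)
  rw [bne_iff_ne, ne_eq, find_mode_eq i _ n (by omega) he0, ← he, PySem.Int.powMod_eq,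
    PySem.Int.mod_eq_emod_of_pos (by omega)]

-- membership in A's list of tested factors
theorem hmem_a (n : Int) (h3 : 3 ≤ n) (j : Int) :
    (j ∈ (PySem.List.pyRange 1 (n.tdiv 2) 1).filter
        (fun j => (PySem.Int.mod (n - 1) j == 0) && isPrime j)) ↔
      (2 ≤ j ∧ j < n.tdiv 2 ∧ Nat.Prime j.toNat ∧ j ∣ (n - 1)) := by
  rw [List.mem_filter, PySem.List.mem_pyRange_one, Bool.and_eq_true, beq_iff_eq,
    PySem.Int.mod_eq_zero_iff_dvd]
  constructor
  · rintro ⟨⟨hj1, hj2⟩, hdvd, hp⟩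
    have hj2' : 2 ≤ j := by
      by_contra hc
      have hj1' : j = 1 := by omega
      subst hj1'
      rw [show isPrime 1 = false by decide] at hp
      exact Bool.false_ne_true hp
    exact ⟨hj2', hj2, (isPrime_iff j hj2').mp hp, hdvd⟩
  · rintro ⟨hj2, hjlt, hp, hdvd⟩
    exact ⟨⟨by omega, hjlt⟩, hdvd, (isPrime_iff j hj2).mpr hp⟩

-- for each candidate i, A's success condition over its factor list coincides with B's
theorem cond_equiv (n : Int) (h3 : 3 ≤ n) (i : Int) :
    ((∀ j ∈ (PySem.List.pyRange 1 (n.tdiv 2) 1).filter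
        (fun j => (PySem.Int.mod (n - 1) j == 0) && isPrime j),
        find_mode i ((n - 1).tdiv j) n ≠ 1) ↔
      (((((if 1 < (tdLoop 2 (n - 1).toNat []).1
            then (tdLoop 2 (n - 1).toNat []).2 ++ [(tdLoop 2 (n - 1).toNat []).1]
            else (tdLoop 2 (n - 1).toNat []).2 : List Nat).filter
            (fun p : Nat => (p : Int) < PySem.Int.floordiv n 2)).map
            (fun p : Nat => PySem.Int.floordiv (n - 1) (p : Int))).all
        (fun e => PySem.Int.powMod i e.toNat n != 1)) = true)) := by
  have hm1 : 1 ≤ (n - 1).toNat := by omega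
  have htd : n.tdiv 2 = PySem.Int.floordiv n 2 := by
    rw [PySem.Int.floordiv_eq_ediv_of_pos (by norm_num), Int.tdiv_eq_ediv_of_nonneg (by omega)]
  have hcast : ((n - 1).toNat : Int) = n - 1 := Int.toNat_of_nonneg (by omega)
  rw [List.all_map, List.all_eq_true]
  simp only [Function.comp_apply]
  constructor
  · intro hA p hp
    rw [List.mem_filter] at hp
    obtain ⟨hpB, hplt⟩ := hp
    rw [primesB_mem _ hm1 p] at hpB
    obtain ⟨hpp, hpd⟩ := hpB
    rw [decide_eq_true_iff] at hplt
    have hdInt : (p : Int) ∣ (n - 1) := by rw [← hcast]; exact_mod_cast hpd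
    have hmem : (p : Int) ∈ (PySem.List.pyRange 1 (n.tdiv 2) 1).filter
        (fun j => (PySem.Int.mod (n - 1) j == 0) && isPrime j) :=
      (hmem_a n h3 _).mpr ⟨by exact_mod_cast hpp.two_le, by rw [htd]; exact hplt,
        by simpa using hpp, hdInt⟩
    exact (helt n h3 i p hpp hdInt).mp (hA (p : Int) hmem)
  · intro hB j hj
    rw [hmem_a n h3 j] at hj
    obtain ⟨hj2, hjlt, hjp, hjd⟩ := hj
    have hj0 : ((j.toNat : Nat) : Int) = j := Int.toNat_of_nonneg (by omega)
    have hpd : j.toNat ∣ (n - 1).toNat := by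
      rw [← hj0, ← hcast] at hjd
      exact_mod_cast hjd
    have hmem : j.toNat ∈ ((if 1 < (tdLoop 2 (n - 1).toNat []).1
          then (tdLoop 2 (n - 1).toNat []).2 ++ [(tdLoop 2 (n - 1).toNat []).1]
          else (tdLoop 2 (n - 1).toNat []).2 : List Nat).filter
          (fun p : Nat => (p : Int) < PySem.Int.floordiv n 2)) :=
      List.mem_filter.mpr ⟨(primesB_mem _ hm1 _).mpr ⟨hjp, hpd⟩,
        by rw [decide_eq_true_iff, hj0, ← htd]; exact hjlt⟩
    have hres := hB j.toNat hmem
    rw [← hj0]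
    exact (helt n h3 i j.toNat hjp (hj0 ▸ hjd)).mpr hres

-- ===== VERDICT (by name: the statement is the Claim_ definition above) =====
theorem find_spec : Claim_equal_find := by
  unfold Claim_equal_find Spec_find
  intro n _
  by_cases hn : n < 3
  · unfold find find_alt
    rw [if_pos hn, PySem.List.pyRange_one_eq_nil (show n ≤ 2 by omega)]
    rfl
  · have h3 : 3 ≤ n := by omega
    unfold find find_alt
    rw [if_neg hn]
    refine loops_eq n _ _ ?_ _ (fun x hx => hx)
    intro i _
    exact cond_equiv n h3 i
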